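-- pv_equiv track=rewrite | github.com/leocjj/job_shop_scheduling_solver | jss_v0.2.py | add_execution_times
-- ===== SOURCE A (Python) =====
-- def add_execution_times(jobs_data):
--     jobs_with_times = []
--     for job in jobs_data:
--         start_time = 0
--         job_with_times = []
--         for machine, duration in job:
--             job_with_times.append([machine, duration, start_time])
--             start_time += duration
--         jobs_with_times.append(job_with_times)
--     return jobs_with_times
-- ===== SOURCE B (Python) =====
-- def add_execution_times(jobs_data):
--     result = []
--     for job in jobs_data:
--         # first pass: prefix-sum table of start times [0, d0, d0+d1, ...]
--         starts = [0]
--         for _, d in job: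
--             starts.append(starts[-1] + d)
--         # second pass: emit rows by zipping the job with the table
--         result.append([[m, d, s] for (m, d), s in zip(job, starts)])
--     return result
-- ===== Notes on version B (the rewrite author's own statement) =====
-- stated objective: alternative
-- what changed: B computes, per job, an explicit prefix-sum table of start times in one pass and then emits the rows in a second pass zipping the job with that table, instead of threading a running start_time through a single loop.
import Mathlib
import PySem

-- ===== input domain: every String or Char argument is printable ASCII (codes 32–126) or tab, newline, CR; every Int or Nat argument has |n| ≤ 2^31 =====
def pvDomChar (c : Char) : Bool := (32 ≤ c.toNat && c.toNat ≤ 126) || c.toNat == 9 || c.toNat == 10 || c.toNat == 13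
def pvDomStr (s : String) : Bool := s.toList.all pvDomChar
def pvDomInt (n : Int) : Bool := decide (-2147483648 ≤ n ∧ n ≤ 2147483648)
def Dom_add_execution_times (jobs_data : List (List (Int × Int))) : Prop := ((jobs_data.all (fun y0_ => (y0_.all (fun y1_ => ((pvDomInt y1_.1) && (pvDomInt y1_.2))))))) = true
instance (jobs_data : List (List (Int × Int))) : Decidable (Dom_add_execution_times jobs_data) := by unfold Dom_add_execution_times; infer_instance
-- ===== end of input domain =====

-- B replaces the single running-sum loop by a per-job prefix-sum table of start
-- times built first, then a second zip pass emitting the rows (alternative decomposition).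


-- ===== PORT A =====
-- inner loop of A: state = (start_time, job_with_times)
def pvAInner (job : List (Int × Int)) : Int × List (List Int) :=
  job.foldl (fun st md => (st.1 + md.2, st.2 ++ [[md.1, md.2, st.1]])) (0, [])

def add_execution_times (jobs_data : List (List (Int × Int))) : List (List (List Int)) :=
  jobs_data.foldl (fun acc job => acc ++ [(pvAInner job).2]) []

-- ===== PORT B =====
-- first pass: starts = [0]; starts.append(starts[-1] + d)
def pvBStarts (job : List (Int × Int)) : List Int :=
  job.foldl (fun s md => s ++ [s.getLastD 0 + md.2]) [0]

-- second pass: zip job with the table, emit rows (zip drops the trailing entry)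
def pvBJob (job : List (Int × Int)) : List (List Int) :=
  (job.zip (pvBStarts job)).map (fun p => [p.1.1, p.1.2, p.2])

def add_execution_times_alt (jobs_data : List (List (Int × Int))) : List (List (List Int)) :=
  jobs_data.map pvBJob

-- ===== PRECONDITION & SPEC =====
def Spec_add_execution_times (jobs_data : List (List (Int × Int))) (out : List (List (List Int))) : Prop := out = add_execution_times_alt jobs_data
instance (jobs_data : List (List (Int × Int))) (out : List (List (List Int))) : Decidable (Spec_add_execution_times jobs_data out) := by unfold Spec_add_execution_times; infer_instance

-- ===== CLAIM (what is proved, stated in full; the proofs are below) =====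
def Claim_equal_add_execution_times : Prop := ∀ (jobs_data : List (List (Int × Int))), Dom_add_execution_times jobs_data → Spec_add_execution_times jobs_data (add_execution_times jobs_data)

-- ===== LEMMAS AND PROOFS =====

-- reference per-job result with explicit start parameter
def pvGo (s : Int) : List (Int × Int) → List (List Int)
  | [] => []
  | (m, d) :: t => [m, d, s] :: pvGo (s + d) t

-- tail of the starts table from start s
def pvTail (s : Int) : List (Int × Int) → List Int
  | [] => []
  | (_, d) :: t => (s + d) :: pvTail (s + d) t

theorem pvAInner_go (job : List (Int × Int)) :
    ∀ (s : Int) (acc : List (List Int)),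
      (job.foldl (fun st md => (st.1 + md.2, st.2 ++ [[md.1, md.2, st.1]])) (s, acc)).2
        = acc ++ pvGo s job := by
  induction job with
  | nil => intro s acc; simp [pvGo]
  | cons hd t ih =>
      intro s acc
      obtain ⟨m, d⟩ := hd
      simp only [List.foldl_cons, pvGo]
      rw [ih]
      simp

theorem pvBStarts_tail (job : List (Int × Int)) :
    ∀ (init : List Int), init ≠ [] →
      job.foldl (fun s md => s ++ [s.getLastD 0 + md.2]) init
        = init ++ pvTail (init.getLastD 0) job := by
  induction job with
  | nil => intro init _; simp [pvTail]
  | cons hd t ih =>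
      intro init hne
      obtain ⟨m, d⟩ := hd
      simp only [List.foldl_cons]
      rw [ih (init ++ [init.getLastD 0 + d]) (by simp)]
      have hlast : (init ++ [init.getLastD 0 + d]).getLastD 0 = init.getLastD 0 + d := by
        simp
      rw [hlast]
      simp [pvTail]

theorem pvZip_go (job : List (Int × Int)) :
    ∀ (s : Int),
      ((job.zip (s :: pvTail s job)).map (fun p => [p.1.1, p.1.2, p.2])) = pvGo s job := by
  induction job with
  | nil => intro s; simp [pvGo]
  | cons hd t ih =>
      intro s
      obtain ⟨m, d⟩ := hd
      simp only [pvTail, List.zip_cons_cons, List.map_cons, pvGo]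
      rw [ih]

theorem pvJob_eq (job : List (Int × Int)) : (pvAInner job).2 = pvBJob job := by
  unfold pvAInner pvBJob pvBStarts
  rw [pvAInner_go job 0 [], pvBStarts_tail job [0] (by simp)]
  simpa using (pvZip_go job 0).symm

-- ===== VERDICT (by name: the statement is the Claim_ definition above) =====
theorem pvOuter (l : List (List (Int × Int))) :
    ∀ (acc : List (List (List Int))),
      l.foldl (fun acc job => acc ++ [(pvAInner job).2]) acc = acc ++ l.map pvBJob := by
  induction l with
  | nil => intro acc; simp
  | cons job t ih =>
      intro acc
      simp only [List.foldl_cons, List.map_cons]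
      rw [ih, pvJob_eq]
      simp

theorem add_execution_times_spec : Claim_equal_add_execution_times := by
  intro jobs_data _
  show add_execution_times jobs_data = add_execution_times_alt jobs_data
  unfold add_execution_times add_execution_times_alt
  simpa using pvOuter jobs_data []
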